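-- pv_equiv track=rewrite | github.com/w5678/leetcode-2021 | 1758. 生成交替二进制字符串的最少操作数/main.py | startWith0
-- ===== SOURCE A (Python) =====
-- def startWith0(s:str) -> int:
--     i,cnt=0,0
--     key=1
--     maps={
--         1:"1",
--         0:"0"
--     }
--     while i<len(s):
--         key = key^1
--         if s[i] == maps[key]:
--             pass
--         else:
--             cnt+=1
--         i+=1
--     return cnt
-- ===== SOURCE B (Python) =====
-- def startWith0(s: str) -> int:
--     even = s[::2]            # positions 0,2,4,... should all be '0'
--     odd = s[1::2]            # positions 1,3,5,... should all be '1'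
--     return (len(even) - even.count('0')) + (len(odd) - odd.count('1'))
-- ===== Notes on version B (the rewrite author's own statement) =====
-- stated objective: faster
-- what changed: A scans character by character with an index while-loop, a toggled key and a dict lookup of the expected char; B has no per-character Python loop at all: it splits the string into the two strided slices s[::2] and s[1::2] and scores each as its length minus its count of the expected character, summing the two.
import Mathlib
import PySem

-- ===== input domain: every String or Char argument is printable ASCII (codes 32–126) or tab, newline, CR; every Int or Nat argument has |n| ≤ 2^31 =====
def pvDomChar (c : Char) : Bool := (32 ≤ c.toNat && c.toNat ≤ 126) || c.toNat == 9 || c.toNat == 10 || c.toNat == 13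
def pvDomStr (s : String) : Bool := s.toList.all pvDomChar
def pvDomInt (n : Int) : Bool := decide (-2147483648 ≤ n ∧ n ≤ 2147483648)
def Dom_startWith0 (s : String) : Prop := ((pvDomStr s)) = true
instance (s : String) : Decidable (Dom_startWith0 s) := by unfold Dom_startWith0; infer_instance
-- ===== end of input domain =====

-- B replaces A's index loop (toggled key + dict lookup per character) with two strided
-- slices s[::2] / s[1::2], each scored as length minus count of its expected character
-- (same O(n); a timing run measured B faster by a constant factor).

-- ===== PORT A =====
-- while-loop → structural recursion over the remaining chars with the same (key, cnt) state;
-- s[i] == maps[key] is compared via Dict.get? (key is always 0 or 1, so the lookup never misses).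
def pvMapsA : PySem.Dict Int String := PySem.Dict.ofList [(1, "1"), (0, "0")]

def pvLoopA : List Char → Int → Int → Int
  | [], _, cnt => cnt
  | c :: rest, key, cnt =>
    let key' := Int.xor key 1
    if PySem.Dict.get? pvMapsA key' == some (String.ofList [c]) then
      pvLoopA rest key' cnt
    else
      pvLoopA rest key' (cnt + 1)

def startWith0 (s : String) : Int := pvLoopA s.toList 1 0

-- ===== PORT B =====
-- s[::2] and s[1::2] → PySem.List.slice? with step 2 (never none since the step is nonzero:
-- .getD [] is unreachable); len and .count('c') → List.length and PySem.List.count.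
def startWith0_alt (s : String) : Int :=
  let even := (PySem.List.slice? s.toList none none 2).getD []
  let odd := (PySem.List.slice? s.toList (some 1) none 2).getD []
  ((even.length : Int) - (PySem.List.count even '0' : Int))
    + ((odd.length : Int) - (PySem.List.count odd '1' : Int))

-- ===== PRECONDITION & SPEC =====
def Spec_startWith0 (s : String) (out : Int) : Prop := out = startWith0_alt s
instance (s : String) (out : Int) : Decidable (Spec_startWith0 s out) := by unfold Spec_startWith0; infer_instance

-- ===== CLAIM (what is proved, stated in full; the proofs are below) =====
def Claim_equal_startWith0 : Prop := ∀ (s : String), Dom_startWith0 s → Spec_startWith0 s (startWith0 s)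

-- ===== LEMMAS AND PROOFS =====

-- canonical form: mismatch count against the alternating pattern, b = "expect '0' next"
def pvMism : List Char → Bool → Int
  | [], _ => 0
  | c :: rest, b => (if c = (if b then '0' else '1') then 0 else 1) + pvMism rest (!b)

-- the chars at even positions: every other element starting at index 0
def pvEvens : List Char → List Char
  | [] => []
  | [a] => [a]
  | a :: _ :: t => a :: pvEvens t

-- ---- A-side: the loop computes pvMism ----

lemma pvLoopA_step_one (c : Char) (rest : List Char) (cnt : Int) :
    pvLoopA (c :: rest) 1 cnt
      = (if ("0" == String.ofList [c]) then pvLoopA rest 0 cnt else pvLoopA rest 0 (cnt + 1)) := rfl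

lemma pvLoopA_step_zero (c : Char) (rest : List Char) (cnt : Int) :
    pvLoopA (c :: rest) 0 cnt
      = (if ("1" == String.ofList [c]) then pvLoopA rest 1 cnt else pvLoopA rest 1 (cnt + 1)) := rfl

lemma pvStr_singleton_beq (a c : Char) : ((String.ofList [a] : String) == String.ofList [c]) = (c == a) := by
  by_cases h : c = a
  · subst h; simp
  · have hne : String.ofList [a] ≠ String.ofList [c] := by
      intro he
      exact h (by simpa using (congrArg String.toList he).symm)
    rw [beq_eq_false_iff_ne.mpr h, beq_eq_false_iff_ne.mpr hne]

lemma pvLoopA_eq : ∀ (cs : List Char) (b : Bool) (cnt : Int),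
    pvLoopA cs (if b then 1 else 0) cnt = cnt + pvMism cs b := by
  intro cs
  induction cs with
  | nil => intro b cnt; simp [pvLoopA, pvMism]
  | cons c rest ih =>
    intro b cnt
    have h0 : ∀ cnt : Int, pvLoopA rest 0 cnt = cnt + pvMism rest false := fun cnt => by
      simpa using ih false cnt
    have h1 : ∀ cnt : Int, pvLoopA rest 1 cnt = cnt + pvMism rest true := fun cnt => by
      simpa using ih true cnt
    cases b with
    | true =>
      rw [if_pos rfl, pvLoopA_step_one,
        show (("0" : String) == String.ofList [c]) = (c == '0') from pvStr_singleton_beq '0' c]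
      by_cases hc : c = '0' <;> simp [hc, pvMism, h0 cnt, h0 (cnt + 1)]; ring
    | false =>
      rw [if_neg (by decide), pvLoopA_step_zero,
        show (("1" : String) == String.ofList [c]) = (c == '1') from pvStr_singleton_beq '1' c]
      by_cases hc : c = '1' <;> simp [hc, pvMism, h1 cnt, h1 (cnt + 1)]; ring

-- ---- B-side: the two strided slices are pvEvens xs and pvEvens xs.tail ----

lemma pvEvens_cons_tail (b : Char) (t : List Char) :
    pvEvens (b :: t) = b :: pvEvens t.tail := by
  cases t <;> rfl

lemma pvEvens_filterMap : ∀ (xs : List Char),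
    List.filterMap (fun k => xs[2 * k]?) (List.range ((xs.length + 1) / 2)) = pvEvens xs := by
  intro xs
  induction xs using pvEvens.induct with
  | case1 => simp [pvEvens]
  | case2 a => simp [pvEvens]
  | case3 a b t ih =>
    have hlen : (a :: b :: t).length + 1 = (t.length + 1) + 2 := by simp
    rw [hlen, show ((t.length + 1) + 2) / 2 = (t.length + 1) / 2 + 1 by omega,
      List.range_succ_eq_map]
    simp only [List.filterMap_cons, List.filterMap_map]
    have hf : ((fun k => (a :: b :: t)[2 * k]?) ∘ Nat.succ) = fun k => t[2 * k]? := by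
      funext k
      show (a :: b :: t)[2 * (k + 1)]? = t[2 * k]?
      rw [show 2 * (k + 1) = (2 * k) + 1 + 1 by omega]
      simp
    rw [hf, ih]
    simp [pvEvens]

lemma pvSlice_even (xs : List Char) :
    PySem.List.slice? xs none none 2 = some (pvEvens xs) := by
  unfold PySem.List.slice? PySem.List.sliceIndices
  simp only [if_neg (by norm_num : ¬ (2:Int) = 0)]
  norm_num
  have hcount : (if 0 < xs.length then
      (((xs.length : Int) + 2 - 1) / 2).toNat else 0) = (xs.length + 1) / 2 := by
    split_ifs with h <;> omega
  rw [hcount]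
  have hf : (fun k : Nat => xs[((2:Int) * (k:Int)).toNat]?) = fun k => xs[2 * k]? := by
    funext k
    rw [show ((2:Int) * (k:Int)).toNat = 2 * k by omega]
  rw [hf, pvEvens_filterMap]

lemma pvSlice_odd (xs : List Char) :
    PySem.List.slice? xs (some 1) none 2 = some (pvEvens xs.tail) := by
  cases xs with
  | nil => decide
  | cons a t =>
    unfold PySem.List.slice? PySem.List.sliceIndices
    simp only [if_neg (by norm_num : ¬ (2:Int) = 0)]
    norm_num
    have hcount : (if 0 < t.length then
        (((t.length : Int) + 2 - 1) / 2).toNat else 0) = (t.length + 1) / 2 := by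
      split_ifs with h <;> omega
    rw [hcount]
    have hf : (fun k : Nat => (a :: t)[((1:Int) + 2 * (k:Int)).toNat]?) = fun k => t[2 * k]? := by
      funext k
      rw [show ((1:Int) + 2 * (k:Int)).toNat = (2 * k) + 1 by omega]
      simp
    rw [hf, pvEvens_filterMap]

-- ---- both strided scores together equal pvMism ----

lemma pvScores_eq : ∀ (cs : List Char),
    (((pvEvens cs).length : Int) - ((pvEvens cs).count '0' : Int))
      + (((pvEvens cs.tail).length : Int) - ((pvEvens cs.tail).count '1' : Int))
      = pvMism cs true := by
  intro cs
  induction cs using pvEvens.induct with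
  | case1 => simp [pvEvens, pvMism]
  | case2 a =>
    simp only [pvEvens, pvMism, List.tail_cons]
    by_cases h : a = '0' <;> simp [h]
  | case3 a b t ih =>
    rw [show pvEvens (a :: b :: t) = a :: pvEvens t from rfl,
      show pvEvens ((a :: b :: t).tail) = b :: pvEvens t.tail from pvEvens_cons_tail b t]
    simp only [pvMism, List.length_cons, List.count_cons, Bool.not_true,
      Bool.not_false] at *
    by_cases ha : a = '0' <;> by_cases hb : b = '1' <;>
      simp [ha, hb] at * <;> omega

-- ===== VERDICT (by name: the statement is the Claim_ definition above) =====
theorem startWith0_spec : Claim_equal_startWith0 := by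
  intro s _
  unfold Spec_startWith0
  show startWith0 s = startWith0_alt s
  unfold startWith0 startWith0_alt
  rw [pvSlice_even, pvSlice_odd]
  simp only [Option.getD_some, PySem.List.count]
  rw [pvScores_eq]
  simpa using pvLoopA_eq s.toList true 0
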